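-- pv_equiv track=rewrite | github.com/HTHhthHTH/FTL-bot23 | bigHomework-Combined(2).py | StandardMode_To_PositioningMode
-- ===== SOURCE A (Python) =====
-- def StandardMode_To_PositioningMode(standard_list):
--     '''输入standard_list，输出position_list，表示归位的模式'''
--     position_list = []
--     for i in range(0,52,4):
--         position_list.append([x for x in range(i,i+4) if x in standard_list])
--     if 52 in standard_list:
--         position_list.append([52])
--     else:
--         position_list.append([])
--     if 53 in standard_list:
--         position_list.append([53])
--     else:
--         position_list.append([])
--     return position_list
-- ===== SOURCE B (Python) =====
-- def StandardMode_To_PositioningMode(standard_list):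
--     '''输入standard_list，输出position_list，表示归位的模式'''
--     buckets = [[] for _ in range(15)]
--     for x in sorted(set(standard_list)):
--         if 0 <= x < 52:
--             buckets[x // 4].append(x)
--         elif x == 52:
--             buckets[13].append(x)
--         elif x == 53:
--             buckets[14].append(x)
--     return buckets
-- ===== Notes on version B (the rewrite author's own statement) =====
-- stated objective: faster
-- what changed: A scans all 52 card codes and runs an O(n) membership test on the input list for each (domain-first scan); B makes one pass over the sorted de-duplicated input and scatters each value into its bucket x//4 (13/14 for the jokers), dropping out-of-range values.
import Mathlib
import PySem

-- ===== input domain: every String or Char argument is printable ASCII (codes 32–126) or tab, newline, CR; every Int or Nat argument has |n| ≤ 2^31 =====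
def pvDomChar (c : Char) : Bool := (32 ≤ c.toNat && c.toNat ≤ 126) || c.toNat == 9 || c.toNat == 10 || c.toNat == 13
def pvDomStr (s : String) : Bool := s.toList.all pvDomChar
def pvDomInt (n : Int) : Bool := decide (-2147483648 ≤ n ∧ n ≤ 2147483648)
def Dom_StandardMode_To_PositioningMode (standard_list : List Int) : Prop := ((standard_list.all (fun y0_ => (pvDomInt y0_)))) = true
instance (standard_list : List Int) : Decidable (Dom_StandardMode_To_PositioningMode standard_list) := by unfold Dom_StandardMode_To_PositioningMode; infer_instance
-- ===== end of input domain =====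

-- B replaces A's domain-first scan (13×4 membership tests against the list) by one scatter
-- pass over sorted(set(standard_list)) into 15 preallocated buckets; same return value, no side effects.

-- ===== PORT A =====
-- literal transliteration of A: for i in range(0,52,4): append [x for x in range(i,i+4) if x in standard_list]; then the two joker buckets
def StandardMode_To_PositioningMode (standard_list : List Int) : List (List Int) :=
  let position_list : List (List Int) :=
    (PySem.List.pyRange 0 52 4).foldl
      (fun acc i => acc ++ [(PySem.List.pyRange i (i+4) 1).filter (fun x => decide (x ∈ standard_list))]) []
  let position_list := position_list ++ [if (52:Int) ∈ standard_list then [(52:Int)] else []]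
  position_list ++ [if (53:Int) ∈ standard_list then [(53:Int)] else []]

-- ===== PORT B =====
-- one scatter step of Source B's loop body: place x into its destination bucket
def pvScatterStep (buckets : List (List Int)) (x : Int) : List (List Int) :=
  if 0 ≤ x ∧ x < 52 then buckets.modify (PySem.Int.floordiv x 4).toNat (· ++ [x])
  else if x = 52 then buckets.modify 13 (· ++ [x])
  else if x = 53 then buckets.modify 14 (· ++ [x])
  else buckets

def StandardMode_To_PositioningMode_alt (standard_list : List Int) : List (List Int) :=
  (PySem.List.sorted (PySem.Set.ofList standard_list) (fun x => x) false).foldl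
    pvScatterStep (List.replicate 15 [])

-- ===== PRECONDITION & SPEC =====
def Spec_StandardMode_To_PositioningMode (standard_list : List Int) (out : List (List Int)) : Prop := out = StandardMode_To_PositioningMode_alt standard_list
instance (standard_list : List Int) (out : List (List Int)) : Decidable (Spec_StandardMode_To_PositioningMode standard_list out) := by unfold Spec_StandardMode_To_PositioningMode; infer_instance

-- ===== CLAIM (what is proved, stated in full; the proofs are below) =====
def Claim_equal_StandardMode_To_PositioningMode : Prop := ∀ (standard_list : List Int), Dom_StandardMode_To_PositioningMode standard_list → Spec_StandardMode_To_PositioningMode standard_list (StandardMode_To_PositioningMode standard_list)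

-- ===== LEMMAS AND PROOFS =====

-- destination bucket of a value, as Source B's if-chain
def pvDest (x : Int) : Option Nat :=
  if 0 ≤ x ∧ x < 52 then some (PySem.Int.floordiv x 4).toNat
  else if x = 52 then some 13
  else if x = 53 then some 14
  else none

lemma pvModify_getElem? (bs : List (List Int)) (i j : Nat) (f : List Int → List Int) :
    (bs.modify i f)[j]? = if (some i : Option Nat) = some j then bs[j]?.map f else bs[j]? := by
  rw [List.getElem?_modify]
  by_cases h : i = j <;> cases hb : bs[j]? <;> simp [h]

lemma pvScatterStep_getElem? (bs : List (List Int)) (x : Int) (j : Nat) :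
    (pvScatterStep bs x)[j]? = if pvDest x = some j then bs[j]?.map (· ++ [x]) else bs[j]? := by
  unfold pvScatterStep pvDest
  split_ifs with h1 h2 h3 <;> simp_all [pvModify_getElem?]

lemma pvScatter_getElem? (s : List Int) : ∀ (bs : List (List Int)) (j : Nat),
    (s.foldl pvScatterStep bs)[j]? =
      bs[j]?.map (· ++ s.filter (fun x => decide (pvDest x = some j))) := by
  induction s with
  | nil => intro bs j; cases hb : bs[j]? <;> simp [hb]
  | cons x s ih =>
    intro bs j
    simp only [List.foldl_cons, ih, pvScatterStep_getElem?, List.filter_cons]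
    by_cases h : pvDest x = some j
    · simp only [h, decide_true]
      cases bs[j]? <;> simp
    · simp only [h, decide_false]
      cases bs[j]? <;> simp

-- two strictly increasing integer lists with the same members are equal
lemma pvEq_of_pairwise_lt_mem {s r : List Int}
    (hs : s.Pairwise (· < ·)) (hr : r.Pairwise (· < ·)) (h : ∀ x, x ∈ s ↔ x ∈ r) : s = r := by
  refine List.Perm.eq_of_pairwise (le := (· ≤ ·)) (l₁ := s) (l₂ := r) (fun a b _ _ hab hba => le_antisymm hab hba)
    (hs.imp le_of_lt) (hr.imp le_of_lt) ?_
  exact (List.perm_ext_iff_of_nodup (hs.imp ne_of_lt) (hr.imp ne_of_lt)).2 h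

lemma pvDest_band (x : Int) (k : Nat) (hk : k < 13) :
    pvDest x = some k ↔ (4*(k:Int) ≤ x ∧ x < 4*(k:Int)+4) := by
  unfold pvDest
  rw [PySem.Int.floordiv_eq_ediv_of_pos (by norm_num)]
  split_ifs with h1 h2 h3
  · rw [Option.some_inj]; omega
  · rw [Option.some_inj]; omega
  · rw [Option.some_inj]; omega
  · exact iff_of_false (by simp) (by omega)

lemma pvDest_52 (x : Int) : pvDest x = some 13 ↔ x = 52 := by
  unfold pvDest
  rw [PySem.Int.floordiv_eq_ediv_of_pos (by norm_num)]
  split_ifs with h1 h2 h3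
  · rw [Option.some_inj]; omega
  · exact iff_of_true rfl h2
  · exact iff_of_false (by simp) (by omega)
  · exact iff_of_false (by simp) (by omega)

lemma pvDest_53 (x : Int) : pvDest x = some 14 ↔ x = 53 := by
  unfold pvDest
  rw [PySem.Int.floordiv_eq_ediv_of_pos (by norm_num)]
  split_ifs with h1 h2 h3
  · rw [Option.some_inj]; omega
  · exact iff_of_false (by simp) (by omega)
  · exact iff_of_true rfl h3
  · exact iff_of_false (by simp) (by omega)

-- the sorted, de-duplicated input
def pvS (l : List Int) : List Int := PySem.List.sorted (PySem.Set.ofList l) (fun x => x) false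

lemma pvS_pairwise (l : List Int) : (pvS l).Pairwise (· < ·) :=
  PySem.List.sorted_ofList_pairwise_lt l

lemma pvS_mem (l : List Int) (x : Int) : x ∈ pvS l ↔ x ∈ l := by
  unfold pvS
  rw [PySem.List.mem_sorted, PySem.Set.mem_ofList]

-- bucket k (k<13) of B's scatter is exactly A's band filter
lemma pvBand (l : List Int) (k : Nat) (hk : k < 13) :
    (pvS l).filter (fun x => decide (pvDest x = some k)) =
      (PySem.List.pyRange (4*(k:Int)) (4*(k:Int)+4) 1).filter (fun x => decide (x ∈ l)) := by
  refine pvEq_of_pairwise_lt_mem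
    (List.Pairwise.sublist List.filter_sublist (pvS_pairwise l))
    (List.Pairwise.sublist List.filter_sublist (PySem.List.pairwise_lt_pyRange_one _ _)) ?_
  intro x
  simp only [List.mem_filter, pvS_mem, decide_eq_true_eq, PySem.List.mem_pyRange_one,
    pvDest_band x k hk]
  tauto

lemma pvJoker (l : List Int) (j : Nat) (v : Int) (hj : ∀ x, pvDest x = some j ↔ x = v) :
    (pvS l).filter (fun x => decide (pvDest x = some j)) = if v ∈ l then [v] else [] := by
  refine pvEq_of_pairwise_lt_mem
    (List.Pairwise.sublist List.filter_sublist (pvS_pairwise l)) ?_ ?_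
  · split_ifs <;> simp
  · intro x
    simp only [List.mem_filter, pvS_mem, decide_eq_true_eq, hj]
    by_cases h : v ∈ l
    · simp only [if_pos h, List.mem_singleton]
      constructor
      · exact fun hx => hx.2
      · rintro rfl; exact ⟨h, rfl⟩
    · simp only [if_neg h, List.not_mem_nil, iff_false]
      rintro ⟨hx, rfl⟩; exact h hx

lemma pvAlt_getElem? (l : List Int) (j : Nat) :
    (StandardMode_To_PositioningMode_alt l)[j]? =
      (List.replicate 15 ([]:List Int))[j]?.map
        (fun b => b ++ (pvS l).filter (fun x => decide (pvDest x = some j))) := by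
  unfold StandardMode_To_PositioningMode_alt
  exact pvScatter_getElem? _ _ j

-- ===== VERDICT (by name: the statement is the Claim_ definition above) =====
theorem StandardMode_To_PositioningMode_spec : Claim_equal_StandardMode_To_PositioningMode := by
  intro l _
  unfold Spec_StandardMode_To_PositioningMode
  have hA : StandardMode_To_PositioningMode l =
      [((PySem.List.pyRange 0 (0+4) 1).filter (fun x => decide (x ∈ l))),
       ((PySem.List.pyRange 4 (4+4) 1).filter (fun x => decide (x ∈ l))),
       ((PySem.List.pyRange 8 (8+4) 1).filter (fun x => decide (x ∈ l))),
       ((PySem.List.pyRange 12 (12+4) 1).filter (fun x => decide (x ∈ l))),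
       ((PySem.List.pyRange 16 (16+4) 1).filter (fun x => decide (x ∈ l))),
       ((PySem.List.pyRange 20 (20+4) 1).filter (fun x => decide (x ∈ l))),
       ((PySem.List.pyRange 24 (24+4) 1).filter (fun x => decide (x ∈ l))),
       ((PySem.List.pyRange 28 (28+4) 1).filter (fun x => decide (x ∈ l))),
       ((PySem.List.pyRange 32 (32+4) 1).filter (fun x => decide (x ∈ l))),
       ((PySem.List.pyRange 36 (36+4) 1).filter (fun x => decide (x ∈ l))),
       ((PySem.List.pyRange 40 (40+4) 1).filter (fun x => decide (x ∈ l))),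
       ((PySem.List.pyRange 44 (44+4) 1).filter (fun x => decide (x ∈ l))),
       ((PySem.List.pyRange 48 (48+4) 1).filter (fun x => decide (x ∈ l))),
       (if (52:Int) ∈ l then [(52:Int)] else []),
       (if (53:Int) ∈ l then [(53:Int)] else [])] := by
    unfold StandardMode_To_PositioningMode
    rw [show PySem.List.pyRange 0 52 4 = [0,4,8,12,16,20,24,28,32,36,40,44,48] from by decide]
    simp [List.foldl_cons, List.foldl_nil]
  refine List.ext_getElem? ?_
  intro j
  rw [hA, pvAlt_getElem?]
  match j with
  | 0 => simpa using (pvBand l 0 (by norm_num)).symm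
  | 1 => simpa using (pvBand l 1 (by norm_num)).symm
  | 2 => simpa using (pvBand l 2 (by norm_num)).symm
  | 3 => simpa using (pvBand l 3 (by norm_num)).symm
  | 4 => simpa using (pvBand l 4 (by norm_num)).symm
  | 5 => simpa using (pvBand l 5 (by norm_num)).symm
  | 6 => simpa using (pvBand l 6 (by norm_num)).symm
  | 7 => simpa using (pvBand l 7 (by norm_num)).symm
  | 8 => simpa using (pvBand l 8 (by norm_num)).symm
  | 9 => simpa using (pvBand l 9 (by norm_num)).symm
  | 10 => simpa using (pvBand l 10 (by norm_num)).symm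
  | 11 => simpa using (pvBand l 11 (by norm_num)).symm
  | 12 => simpa using (pvBand l 12 (by norm_num)).symm
  | 13 => simpa using (pvJoker l 13 52 pvDest_52).symm
  | 14 => simpa using (pvJoker l 14 53 pvDest_53).symm
  | (n+15) => simp
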